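-- pv_equiv track=rewrite | github.com/mgtezak/Advent_of_Code | 2020/11/p2.py | part2
-- ===== SOURCE A (Python) =====
-- def part2(puzzle_input):
--
--     puzzle_input = puzzle_input.split()
--     width, height = len(puzzle_input[0]), len(puzzle_input)
--
--     def get_adjacent(x, y):
--         adj = set()
--         for dx in range(-1, 2):
--             for dy in range(-1, 2):
--                 if dx == dy == 0:
--                     continue
--                 i, j = x + dx, y + dy
--                 while i in range(0, height) and j in range(0, width):
--                     if puzzle_input[i][j] == 'L':
--                         adj.add((i, j))
--                         break
--                     i, j = i + dx, j + dy
--         return adj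
--
--     graph = {}
--     for x in range(height):
--         for y in range(width):
--             if puzzle_input[x][y] == '.':
--                 continue
--             graph[(x, y)] = get_adjacent(x, y)
--
--     occupied = set(graph)
--     while True:
--         nxt_occupied = set()
--         for coords in graph:
--             adj_occupied = len(graph[coords] & occupied)
--             if (adj_occupied == 0) or (coords in occupied and adj_occupied < 5):
--                 nxt_occupied.add(coords)
--
--         if occupied == nxt_occupied:
--             break
--
--         occupied = nxt_occupied
--
--     return len(occupied)
-- ===== SOURCE B (Python) =====
-- def part2(puzzle_input):
--     grid = puzzle_input.split()
--     height, width = len(grid), len(grid[0])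
--     dirs = [(-1, -1), (-1, 0), (-1, 1), (0, -1), (0, 1), (1, -1), (1, 0), (1, 1)]
--
--     def first_seat(x, y, dx, dy):
--         i, j = x + dx, y + dy
--         while 0 <= i < height and 0 <= j < width:
--             if grid[i][j] == 'L':
--                 return (i, j)
--             i, j = i + dx, j + dy
--         return None
--
--     seats = [(x, y) for x in range(height) for y in range(width) if grid[x][y] != '.']
--     occupied = frozenset(seats)
--     while True:
--         nxt = frozenset(
--             (x, y) for (x, y) in seats
--             if (visible := sum(1 for (dx, dy) in dirs if first_seat(x, y, dx, dy) in occupied)) == 0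
--                or ((x, y) in occupied and visible < 5)
--         )
--         if nxt == occupied:
--             return len(occupied)
--         occupied = nxt
-- ===== Notes on version B (the rewrite author's own statement) =====
-- stated objective: alternative
-- what changed: B drops A's precomputed per-cell visibility-graph dict and its per-round set intersections: each round it rescans the 8 lines of sight from every seat with plain bound comparisons and counts per direction whether the first visible seat is occupied, filtering the seat list to build the next occupied set.
import Mathlib
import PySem

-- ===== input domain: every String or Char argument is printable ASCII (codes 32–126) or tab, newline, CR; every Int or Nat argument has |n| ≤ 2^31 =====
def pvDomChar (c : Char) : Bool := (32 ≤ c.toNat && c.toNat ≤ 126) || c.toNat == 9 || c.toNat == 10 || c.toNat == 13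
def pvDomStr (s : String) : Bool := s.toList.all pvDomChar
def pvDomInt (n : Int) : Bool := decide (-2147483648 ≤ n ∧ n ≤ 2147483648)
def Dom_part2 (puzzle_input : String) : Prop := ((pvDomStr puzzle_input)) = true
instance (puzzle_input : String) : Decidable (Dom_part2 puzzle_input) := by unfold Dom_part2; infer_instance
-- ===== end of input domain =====

-- B re-implements the automaton without A's precomputed visibility graph: it rescans the
-- 8 lines of sight from every seat on every iteration and counts per direction.
-- Both whiles are guarded by fuel for totality only (identical fuel, so the claim is unconditional on it).

-- ===== PORT A =====
-- A's inner 'while i in range(0, height) and j in range(0, width)' walk (fuel = totality guard)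
def pvWalkA (pi : List (List Char)) (h w dx dy : Int) : Nat → Int → Int → Option (Int × Int)
  | 0, _, _ => none
  | fuel+1, i, j =>
    if 0 ≤ i ∧ i < h ∧ 0 ≤ j ∧ j < w then
      if PySem.List.pyGetD (PySem.List.pyGetD pi i []) j ' ' = 'L' then some (i, j)
      else pvWalkA pi h w dx dy fuel (i + dx) (j + dy)
    else none

-- A's get_adjacent(x, y): fold the found seat of each direction into a set
def pvGetAdj (pi : List (List Char)) (h w x y : Int) : PySem.Set (Int × Int) :=
  (PySem.List.pyRange (-1) 2 1).foldl (fun adj dx =>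
    (PySem.List.pyRange (-1) 2 1).foldl (fun adj dy =>
      if dx = 0 ∧ dy = 0 then adj
      else
        match pvWalkA pi h w dx dy ((h + w).toNat + 1) (x + dx) (y + dy) with
        | some c => PySem.Set.add adj c
        | none => adj) adj) PySem.Set.empty

-- A's graph-building double loop
def pvGraph (pi : List (List Char)) (h w : Int) : PySem.Dict (Int × Int) (PySem.Set (Int × Int)) :=
  (PySem.List.pyRange 0 h 1).foldl (fun g x =>
    (PySem.List.pyRange 0 w 1).foldl (fun g y =>
      if PySem.List.pyGetD (PySem.List.pyGetD pi x []) y ' ' = '.' then g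
      else g.insert (x, y) (pvGetAdj pi h w x y)) g) PySem.Dict.empty

-- A's 'while True' fixpoint loop (fuel = totality guard; 2^|graph|+1 covers every run that terminates)
def pvLoopA (graph : PySem.Dict (Int × Int) (PySem.Set (Int × Int))) :
    Nat → PySem.Set (Int × Int) → Int
  | 0, occ => PySem.Set.len occ
  | fuel+1, occ =>
    let nxt := graph.keys.foldl (fun nxt coords =>
      let adjOcc := PySem.Set.len (PySem.Set.inter (graph.getD coords PySem.Set.empty) occ)
      if adjOcc = 0 ∨ (PySem.Set.contains occ coords = true ∧ adjOcc < 5) then PySem.Set.add nxt coords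
      else nxt) PySem.Set.empty
    if PySem.Set.equal occ nxt then PySem.Set.len occ
    else pvLoopA graph fuel nxt

def part2 (puzzle_input : String) : Int :=
  let pi := (PySem.Str.split₀ puzzle_input).map String.toList
  let w : Int := (PySem.List.pyGetD pi 0 []).length
  let h : Int := pi.length
  let graph := pvGraph pi h w
  pvLoopA graph (2 ^ graph.keys.length + 1) (PySem.Set.ofList graph.keys)

-- ===== PORT B =====
-- B's first_seat(x, y, dx, dy) walk (same while loop, fuel = totality guard)
def pvFirstSeat (grid : List (List Char)) (h w dx dy : Int) : Nat → Int → Int → Option (Int × Int)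
  | 0, _, _ => none
  | fuel+1, i, j =>
    if 0 ≤ i ∧ i < h ∧ 0 ≤ j ∧ j < w then
      if PySem.List.pyGetD (PySem.List.pyGetD grid i []) j ' ' = 'L' then some (i, j)
      else pvFirstSeat grid h w dx dy fuel (i + dx) (j + dy)
    else none

def pvDirs : List (Int × Int) :=
  [(-1, -1), (-1, 0), (-1, 1), (0, -1), (0, 1), (1, -1), (1, 0), (1, 1)]

-- B's 'while True' loop: rescan the lines of sight each iteration, count occupied per direction
def pvLoopB (grid : List (List Char)) (h w : Int) (seats : List (Int × Int)) :
    Nat → PySem.Set (Int × Int) → Int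
  | 0, occ => PySem.Set.len occ
  | fuel+1, occ =>
    let nxt := PySem.Set.ofList (seats.filter (fun c =>
      let visible : Int := ((pvDirs.filter (fun d =>
        match pvFirstSeat grid h w d.1 d.2 ((h + w).toNat + 1) (c.1 + d.1) (c.2 + d.2) with
        | some s => PySem.Set.contains occ s
        | none => false)).length : Int)
      (visible == 0) || (PySem.Set.contains occ c && decide (visible < 5))))
    if PySem.Set.equal nxt occ then PySem.Set.len occ
    else pvLoopB grid h w seats fuel nxt

def part2_alt (puzzle_input : String) : Int :=
  let grid := (PySem.Str.split₀ puzzle_input).map String.toList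
  let h : Int := grid.length
  let w : Int := (PySem.List.pyGetD grid 0 []).length
  let seats := (PySem.List.pyRange 0 h 1).flatMap (fun x =>
    ((PySem.List.pyRange 0 w 1).filter
        (fun y => !(PySem.List.pyGetD (PySem.List.pyGetD grid x []) y ' ' == '.'))).map (fun y => (x, y)))
  pvLoopB grid h w seats (2 ^ seats.length + 1) (PySem.Set.ofList seats)

-- ===== PRECONDITION & SPEC =====
-- Pre_ excludes inputs where A raises: an all-whitespace input (split() is empty, puzzle_input[0]
-- IndexError) and ragged grids whose later rows are shorter than row 0 (IndexError on row[y]).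
def Pre_part2 (puzzle_input : String) : Prop :=
  PySem.Str.split₀ puzzle_input ≠ [] ∧
  ∀ r ∈ PySem.Str.split₀ puzzle_input,
    ((PySem.Str.split₀ puzzle_input).headD "").toList.length ≤ r.toList.length
instance (puzzle_input : String) : Decidable (Pre_part2 puzzle_input) := by
  unfold Pre_part2; infer_instance

def pvWitness_part2 : String := "L.L\nLLL"

def Spec_part2 (puzzle_input : String) (out : Int) : Prop := out = part2_alt puzzle_input
instance (puzzle_input : String) (out : Int) : Decidable (Spec_part2 puzzle_input out) := by
  unfold Spec_part2; infer_instance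

-- ===== CLAIM (what is proved, stated in full; the proofs are below) =====
def Claim_equal_part2 : Prop := ∀ (puzzle_input : String), Dom_part2 puzzle_input →
  Pre_part2 puzzle_input → Spec_part2 puzzle_input (part2 puzzle_input)

-- ===== LEMMAS AND PROOFS =====

-- the two whiles are the same loop
theorem pvWalk_eq (pi : List (List Char)) (h w dx dy : Int) (fuel : Nat) (i j : Int) :
    pvWalkA pi h w dx dy fuel i j = pvFirstSeat pi h w dx dy fuel i j := by
  induction fuel generalizing i j with
  | zero => rfl
  | succ n ih => simp only [pvWalkA, pvFirstSeat]; split_ifs <;> simp [ih]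

-- a found seat lies on the ray
theorem pvWalk_ray (pi : List (List Char)) (h w dx dy : Int) (fuel : Nat) (i j a b : Int)
    (hs : pvWalkA pi h w dx dy fuel i j = some (a, b)) :
    ∃ k : Nat, a = i + k * dx ∧ b = j + k * dy := by
  induction fuel generalizing i j with
  | zero => simp [pvWalkA] at hs
  | succ n ih =>
    simp only [pvWalkA] at hs
    split_ifs at hs with h1 h2
    · simp only [Option.some.injEq, Prod.mk.injEq] at hs
      exact ⟨0, by simp [hs.1, hs.2]⟩
    · obtain ⟨k, hk1, hk2⟩ := ih _ _ hs
      exact ⟨k + 1, by push_cast; linear_combination hk1, by push_cast; linear_combination hk2⟩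

-- generic: a foldl that conditionally acts is a foldl over the filtered list
theorem pvFoldlIte {α β : Type} (p : α → Prop) [DecidablePred p] (g : β → α → β)
    (l : List α) (s : β) :
    l.foldl (fun s c => if p c then g s c else s) s = (l.filter (fun c => decide (p c))).foldl g s := by
  induction l generalizing s with
  | nil => rfl
  | cons a l ih => by_cases h : p a <;> simp [h, ih]

-- generic: folding Set.add over the some-results appends them when they are fresh and distinct
theorem pvFoldlAddOpt {D C : Type} [BEq C] [LawfulBEq C] (f : D → Option C) (l : List D)
    (s : PySem.Set C) (hnd : (s ++ l.filterMap f).Nodup) :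
    l.foldl (fun s d => (f d).elim s (fun c => PySem.Set.add s c)) s
      = s ++ l.filterMap f := by
  induction l generalizing s with
  | nil => simp
  | cons d l ih =>
    cases hf : f d with
    | none => simpa [List.foldl_cons, hf] using ih s (by simpa [hf] using hnd)
    | some c =>
      have hc : c ∉ s := fun hmem =>
        (List.disjoint_of_nodup_append (by simpa [hf] using hnd)) hmem (by simp)
      simp only [List.foldl_cons, hf, Option.elim_some, PySem.Set.add_of_not_mem hc]
      rw [ih (s ++ [c]) (by simpa [hf, List.append_assoc] using hnd)]
      simp [hf, List.append_assoc]

-- generic: filterMap of an injective-on-the-list partial function keeps Nodup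
theorem pvNodupFilterMap {D C : Type} (f : D → Option C) (l : List D) (hl : l.Nodup)
    (hinj : ∀ d1 ∈ l, ∀ d2 ∈ l, ∀ c, f d1 = some c → f d2 = some c → d1 = d2) :
    (l.filterMap f).Nodup := by
  induction l with
  | nil => simp
  | cons a l ih =>
    have hl' := List.nodup_cons.mp hl
    cases hf : f a with
    | none =>
      simpa [List.filterMap_cons, hf] using
        ih hl'.2 (fun d1 h1 d2 h2 c e1 e2 => hinj d1 (by simp [h1]) d2 (by simp [h2]) c e1 e2)
    | some c =>
      simp only [List.filterMap_cons, hf, List.nodup_cons]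
      refine ⟨?_, ih hl'.2 (fun d1 h1 d2 h2 c e1 e2 => hinj d1 (by simp [h1]) d2 (by simp [h2]) c e1 e2)⟩
      intro hmem
      obtain ⟨d, hd, hfd⟩ := List.mem_filterMap.mp hmem
      exact hl'.1 (hinj a (by simp) d (by simp [hd]) c hf hfd ▸ hd)

-- nodup of results across the 8 directions (rays from one origin do not meet)
theorem pvDirsNodup (pi : List (List Char)) (h w x y : Int) (F : Nat) :
    (pvDirs.filterMap (fun d => pvWalkA pi h w d.1 d.2 F (x + d.1) (y + d.2))).Nodup := by
  refine pvNodupFilterMap _ _ (by decide) ?_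
  intro d1 h1 d2 h2 c e1 e2
  obtain ⟨a, b⟩ := c
  obtain ⟨k1, hk11, hk12⟩ := pvWalk_ray pi h w d1.1 d1.2 F _ _ _ _ e1
  obtain ⟨k2, hk21, hk22⟩ := pvWalk_ray pi h w d2.1 d2.2 F _ _ _ _ e2
  simp only [pvDirs, List.mem_cons, List.not_mem_nil, or_false] at h1 h2
  rcases h1 with rfl|rfl|rfl|rfl|rfl|rfl|rfl|rfl <;>
    rcases h2 with rfl|rfl|rfl|rfl|rfl|rfl|rfl|rfl <;>
    first
    | rfl
    | (exfalso; simp only [] at hk11 hk12 hk21 hk22; omega)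

-- the nested range fold of A is a fold over the 8-direction list
theorem pvNestedFold {β : Type} (g : β → Int × Int → β) (s : β) :
    (PySem.List.pyRange (-1) 2 1).foldl (fun adj dx =>
      (PySem.List.pyRange (-1) 2 1).foldl (fun adj dy =>
        if dx = 0 ∧ dy = 0 then adj else g adj (dx, dy)) adj) s
      = pvDirs.foldl g s := by
  have : PySem.List.pyRange (-1) 2 1 = [-1, 0, 1] := by decide
  simp [this, pvDirs, List.foldl]

-- A's adjacency set is the list of per-direction finds
theorem pvGetAdj_eq (pi : List (List Char)) (h w x y : Int) :
    pvGetAdj pi h w x y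
      = pvDirs.filterMap (fun d => pvWalkA pi h w d.1 d.2 ((h + w).toNat + 1) (x + d.1) (y + d.2)) := by
  unfold pvGetAdj
  rw [pvNestedFold (fun adj d =>
    match pvWalkA pi h w d.1 d.2 ((h + w).toNat + 1) (x + d.1) (y + d.2) with
    | some c => PySem.Set.add adj c
    | none => adj) PySem.Set.empty]
  rw [PySem.List.foldl_congr_mem pvDirs _
    (fun adj d => (pvWalkA pi h w d.1 d.2 ((h + w).toNat + 1) (x + d.1) (y + d.2)).elim adj
      (fun c => PySem.Set.add adj c)) PySem.Set.empty
    (by intro acc d _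
        cases hf : pvWalkA pi h w d.1 d.2 ((h + w).toNat + 1) (x + d.1) (y + d.2) <;> simp [hf])]
  exact (pvFoldlAddOpt
    (fun d => pvWalkA pi h w d.1 d.2 ((h + w).toNat + 1) (x + d.1) (y + d.2)) pvDirs []
    (by simpa using pvDirsNodup pi h w x y ((h + w).toNat + 1))).trans (List.nil_append _)

-- A's graph is the fold of inserts over B's seat list
theorem pvGraph_eq (pi : List (List Char)) (h w : Int) (seats : List (Int × Int))
    (hseats : seats = (PySem.List.pyRange 0 h 1).flatMap (fun x =>
      ((PySem.List.pyRange 0 w 1).filter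
          (fun y => !(PySem.List.pyGetD (PySem.List.pyGetD pi x []) y ' ' == '.'))).map (fun y => (x, y)))) :
    pvGraph pi h w = seats.foldl (fun g c => g.insert c (pvGetAdj pi h w c.1 c.2)) PySem.Dict.empty := by
  subst hseats
  unfold pvGraph
  rw [List.foldl_flatMap]
  refine PySem.List.foldl_congr_mem _ _ _ _ ?_
  intro g x _
  rw [List.foldl_map]
  rw [PySem.List.foldl_congr_mem (PySem.List.pyRange 0 w 1) _
    (fun g y => if ¬(PySem.List.pyGetD (PySem.List.pyGetD pi x []) y ' ' = '.') then
        g.insert (x, y) (pvGetAdj pi h w x y) else g) g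
    (by intro acc y _
        by_cases hq : PySem.List.pyGetD (PySem.List.pyGetD pi x []) y ' ' = '.' <;> simp [hq])]
  rw [pvFoldlIte (fun y => ¬(PySem.List.pyGetD (PySem.List.pyGetD pi x []) y ' ' = '.'))
    (fun g y => g.insert (x, y) (pvGetAdj pi h w x y)) (PySem.List.pyRange 0 w 1) g]
  rw [List.filter_congr (q := fun y => !(PySem.List.pyGetD (PySem.List.pyGetD pi x []) y ' ' == '.'))
    (by intro y _
        by_cases hq : PySem.List.pyGetD (PySem.List.pyGetD pi x []) y ' ' = '.' <;> simp [hq])]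

theorem pvSeatsNodup (pi : List (List Char)) (h w : Int) :
    ((PySem.List.pyRange 0 h 1).flatMap (fun x =>
      ((PySem.List.pyRange 0 w 1).filter
          (fun y => !(PySem.List.pyGetD (PySem.List.pyGetD pi x []) y ' ' == '.'))).map (fun y => (x, y)))).Nodup := by
  rw [List.nodup_flatMap]
  constructor
  · intro x _
    exact ((PySem.List.nodup_pyRange_one 0 w).filter _).map (fun a b hab => by
      simpa using (Prod.mk.injEq _ _ _ _ ▸ hab :))
  · refine List.Pairwise.imp ?_ (PySem.List.nodup_pyRange_one 0 h)
    intro x1 x2 hne a ha hb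
    simp only [List.mem_map, List.mem_filter] at ha hb
    obtain ⟨y1, _, rfl⟩ := ha
    obtain ⟨y2, _, h2⟩ := hb
    exact hne (congrArg Prod.fst h2.symm)

theorem pvGraph_keys (pi : List (List Char)) (h w : Int) (seats : List (Int × Int))
    (hseats : seats = (PySem.List.pyRange 0 h 1).flatMap (fun x =>
      ((PySem.List.pyRange 0 w 1).filter
          (fun y => !(PySem.List.pyGetD (PySem.List.pyGetD pi x []) y ' ' == '.'))).map (fun y => (x, y)))) :
    (pvGraph pi h w).keys = seats := by
  rw [pvGraph_eq pi h w seats hseats, PySem.Dict.keys_foldl_insert]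
  have : (PySem.Dict.empty : PySem.Dict (Int × Int) (PySem.Set (Int × Int))).keys = [] := rfl
  rw [this, PySem.Set.update_nil_left, PySem.Set.ofList_eq_self_of_nodup _ (hseats ▸ pvSeatsNodup pi h w)]

-- lookups in a dict built by inserting a fresh value per distinct key
theorem pvGetDFoldlNotMem {K V : Type} [BEq K] [LawfulBEq K] (F : K → V) (l : List K)
    (d : PySem.Dict K V) (c : K) (dflt : V) (hc : c ∉ l) :
    (l.foldl (fun d k => d.insert k (F k)) d).getD c dflt = d.getD c dflt := by
  induction l generalizing d with
  | nil => rfl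
  | cons a l ih =>
    simp only [List.foldl_cons]
    rw [ih _ (fun hmem => hc (List.mem_cons_of_mem _ hmem)),
      PySem.Dict.getD_insert_of_ne _ _ _ (fun he : c = a => hc (he ▸ List.mem_cons_self))]

theorem pvGetDFoldlMem {K V : Type} [BEq K] [LawfulBEq K] (F : K → V) (l : List K)
    (d : PySem.Dict K V) (c : K) (dflt : V) (hc : c ∈ l) (hnd : l.Nodup) :
    (l.foldl (fun d k => d.insert k (F k)) d).getD c dflt = F c := by
  induction l generalizing d with
  | nil => simp at hc
  | cons a l ih =>
    simp only [List.foldl_cons]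
    rcases List.mem_cons.mp hc with rfl | hcl
    · rw [pvGetDFoldlNotMem _ _ _ _ _ (List.nodup_cons.mp hnd).1, PySem.Dict.getD_insert_self]
    · exact ih _ hcl (List.nodup_cons.mp hnd).2

theorem pvGraph_getD (pi : List (List Char)) (h w : Int) (seats : List (Int × Int))
    (hseats : seats = (PySem.List.pyRange 0 h 1).flatMap (fun x =>
      ((PySem.List.pyRange 0 w 1).filter
          (fun y => !(PySem.List.pyGetD (PySem.List.pyGetD pi x []) y ' ' == '.'))).map (fun y => (x, y))))
    (c : Int × Int) (hc : c ∈ seats) :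
    (pvGraph pi h w).getD c PySem.Set.empty = pvGetAdj pi h w c.1 c.2 := by
  rw [pvGraph_eq pi h w seats hseats]
  exact pvGetDFoldlMem _ _ _ _ _ hc (hseats ▸ pvSeatsNodup pi h w)

-- per-cell: A's |graph[c] ∩ occ| equals B's per-direction count
theorem pvCount_eq (pi : List (List Char)) (h w : Int) (c : Int × Int)
    (occ : PySem.Set (Int × Int)) :
    PySem.Set.len (PySem.Set.inter (pvGetAdj pi h w c.1 c.2) occ)
      = ((pvDirs.filter (fun d =>
          match pvFirstSeat pi h w d.1 d.2 ((h + w).toNat + 1) (c.1 + d.1) (c.2 + d.2) with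
          | some s => PySem.Set.contains occ s
          | none => false)).length : Int) := by
  rw [pvGetAdj_eq]
  simp only [PySem.Set.len, PySem.Set.inter]
  congr 1
  rw [← List.countP_eq_length_filter, ← List.countP_eq_length_filter, List.countP_filterMap]
  refine List.countP_congr ?_
  intro d _
  rw [← pvWalk_eq]
  cases hf : pvWalkA pi h w d.1 d.2 ((h + w).toNat + 1) (c.1 + d.1) (c.2 + d.2) <;> simp

theorem pvLoop_eq (pi : List (List Char)) (h w : Int) (seats : List (Int × Int))
    (hseats : seats = (PySem.List.pyRange 0 h 1).flatMap (fun x =>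
      ((PySem.List.pyRange 0 w 1).filter
          (fun y => !(PySem.List.pyGetD (PySem.List.pyGetD pi x []) y ' ' == '.'))).map (fun y => (x, y))))
    (fuel : Nat) (occ : PySem.Set (Int × Int)) :
    pvLoopA (pvGraph pi h w) fuel occ = pvLoopB pi h w seats fuel occ := by
  induction fuel generalizing occ with
  | zero => rfl
  | succ n ih =>
    have hkeys := pvGraph_keys pi h w seats hseats
    simp only [pvLoopA, pvLoopB, hkeys]
    have hnxt : seats.foldl (fun nxt coords =>
          if PySem.Set.len (PySem.Set.inter ((pvGraph pi h w).getD coords PySem.Set.empty) occ) = 0 ∨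
             (PySem.Set.contains occ coords = true ∧
              PySem.Set.len (PySem.Set.inter ((pvGraph pi h w).getD coords PySem.Set.empty) occ) < 5)
          then PySem.Set.add nxt coords else nxt) PySem.Set.empty
        = PySem.Set.ofList (seats.filter (fun c =>
            (((((pvDirs.filter (fun d =>
              match pvFirstSeat pi h w d.1 d.2 ((h + w).toNat + 1) (c.1 + d.1) (c.2 + d.2) with
              | some s => PySem.Set.contains occ s
              | none => false)).length : Int)) == 0) ||
             (PySem.Set.contains occ c &&
              decide (((pvDirs.filter (fun d =>
                match pvFirstSeat pi h w d.1 d.2 ((h + w).toNat + 1) (c.1 + d.1) (c.2 + d.2) with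
                | some s => PySem.Set.contains occ s
                | none => false)).length : Int) < 5))))) := by
      rw [pvFoldlIte _ PySem.Set.add seats PySem.Set.empty, PySem.Set.ofList_eq_foldl]
      congr 1
      refine List.filter_congr ?_
      intro c hc
      rw [pvGraph_getD pi h w seats hseats c hc, pvCount_eq]
      rw [Bool.eq_iff_iff]
      simp only [decide_eq_true_eq, Bool.or_eq_true, beq_iff_eq, Bool.and_eq_true]
    rw [hnxt]
    have hequal : ∀ (t : PySem.Set (Int × Int)), PySem.Set.equal occ t = PySem.Set.equal t occ := by
      intro t; simp only [PySem.Set.equal, Bool.and_comm]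
    rw [hequal]
    split
    · rfl
    · exact ih _

-- ===== VERDICT (by name: the statement is the Claim_ definition above) =====
theorem part2_spec : Claim_equal_part2 := by
  intro s _ _
  unfold Spec_part2
  simp only [part2, part2_alt, pvGraph_keys _ _ _ _ rfl, pvLoop_eq _ _ _ _ rfl]
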